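-- pv_equiv track=rewrite | github.com/nrflynn2/Algorithm-Challenges | Rosalind/Stronghold/MRNA.py | calc_permutations
-- ===== SOURCE A (Python) =====
-- def calc_permutations(data):
--     prob_dict = {'F': 2,'L': 6, 'M': 1, 'A': 4, 'S':6, 'Y':2, 'C':2, 'W':1,
--         'P':4, 'H':2, 'Q':2, 'R':6, 'I':3, 'T':4, 'N':2, 'K':2, 'V':4,
--         'D':2, 'E':2, 'G':4}
--     total = 3 # Start at 3 to account for stop codon
--     for aa in data:
--         total = total * prob_dict[aa]
--     return total % 1000000
-- ===== SOURCE B (Python) =====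
-- def calc_permutations(data):
--     prob_dict = dict(zip("FLMASYCWPHQRITNKVDEG",
--                          (2, 6, 1, 4, 6, 2, 2, 1, 4, 2, 2, 6, 3, 4, 2, 2, 4, 2, 2, 4)))
--     counts = {}
--     for aa in data:
--         counts[aa] = counts.get(aa, 0) + 1
--     total = 3  # Start at 3 to account for stop codon
--     for aa, n in counts.items():
--         total = total * prob_dict[aa] ** n
--     return total % 1000000
-- ===== Notes on version B (the rewrite author's own statement) =====
-- stated objective: alternative
-- what changed: B first builds a frequency table of the protein string, then multiplies prob_dict[aa] ** count once per distinct residue, instead of A's multiply-per-character pass; the modulus is applied once at the end as in A.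
import Mathlib
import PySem

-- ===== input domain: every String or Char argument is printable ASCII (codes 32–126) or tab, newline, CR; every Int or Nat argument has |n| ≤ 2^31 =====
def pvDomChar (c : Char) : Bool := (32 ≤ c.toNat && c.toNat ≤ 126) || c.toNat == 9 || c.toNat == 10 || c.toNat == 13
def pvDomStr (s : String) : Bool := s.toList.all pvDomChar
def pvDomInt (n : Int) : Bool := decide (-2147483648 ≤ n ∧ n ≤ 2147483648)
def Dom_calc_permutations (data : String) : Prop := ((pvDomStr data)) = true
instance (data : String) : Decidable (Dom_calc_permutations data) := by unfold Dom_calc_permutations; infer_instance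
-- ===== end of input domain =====

-- B replaces A's multiply-per-character pass by a count-table over the distinct residues
-- followed by one power-multiply per distinct residue (objective: alternative decomposition).

-- ===== PORT A =====
-- A's codon-count dict literal
def probDict : PySem.Dict Char Int := PySem.Dict.ofList
  [('F', 2), ('L', 6), ('M', 1), ('A', 4), ('S', 6), ('Y', 2), ('C', 2), ('W', 1),
   ('P', 4), ('H', 2), ('Q', 2), ('R', 6), ('I', 3), ('T', 4), ('N', 2), ('K', 2),
   ('V', 4), ('D', 2), ('E', 2), ('G', 4)]

-- prob_dict[aa] raises KeyError on a residue not in the table; Pre_ excludes exactly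
-- those inputs, so 'getD aa 0' is exact on every admitted input.
def calc_permutations (data : String) : Int :=
  let total := data.toList.foldl (fun total aa => total * probDict.getD aa 0) 3
  PySem.Int.mod total 1000000

-- ===== PORT B =====
-- B's prob_dict = dict(zip("FLMASYCWPHQRITNKVDEG", (2, 6, ...)))
def probDictB : PySem.Dict Char Int := PySem.Dict.ofList
  ("FLMASYCWPHQRITNKVDEG".toList.zip [2, 6, 1, 4, 6, 2, 2, 1, 4, 2, 2, 6, 3, 4, 2, 2, 4, 2, 2, 4])

def calc_permutations_alt (data : String) : Int :=
  -- counts[aa] = counts.get(aa, 0) + 1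
  let counts := data.toList.foldl (fun d aa => d.insert aa (d.getD aa 0 + 1))
    (PySem.Dict.empty : PySem.Dict Char Int)
  -- total = total * prob_dict[aa] ** n over counts.items(); counts are ≥ 1, so '^ n.toNat' is Python's '** n'
  let total := counts.items.foldl (fun total p => total * probDictB.getD p.1 0 ^ p.2.toNat) 3
  PySem.Int.mod total 1000000

-- ===== PRECONDITION & SPEC =====
-- Pre_ excludes exactly the inputs containing a character outside the 20 amino-acid
-- letters, on which both Pythons raise KeyError.
def Pre_calc_permutations (data : String) : Prop :=
  (data.toList.all (fun c => c ∈
    ['F', 'L', 'M', 'A', 'S', 'Y', 'C', 'W', 'P', 'H', 'Q', 'R', 'I', 'T', 'N', 'K', 'V', 'D', 'E', 'G'])) = true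
instance (data : String) : Decidable (Pre_calc_permutations data) := by
  unfold Pre_calc_permutations; infer_instance
def pvWitness_calc_permutations : String := "MASSIVE"

def Spec_calc_permutations (data : String) (out : Int) : Prop := out = calc_permutations_alt data
instance (data : String) (out : Int) : Decidable (Spec_calc_permutations data out) := by unfold Spec_calc_permutations; infer_instance

-- ===== CLAIM (what is proved, stated in full; the proofs are below) =====
def Claim_equal_calc_permutations : Prop := ∀ (data : String), Dom_calc_permutations data → Pre_calc_permutations data → Spec_calc_permutations data (calc_permutations data)

-- ===== LEMMAS AND PROOFS =====

-- the two dict literals hold the same key/value pairs in the same order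
set_option maxRecDepth 40000 in
theorem probDictB_eq : probDictB = probDict := by decide

-- a multiply-accumulate loop is init * product
theorem foldl_mul_eq_prod {α : Type} (l : List α) (f : α → Int) (t : Int) :
    l.foldl (fun t x => t * f x) t = t * (l.map f).prod := by
  induction l generalizing t with
  | nil => simp
  | cons x xs ih => simp [ih, mul_assoc]

-- the power-per-distinct-residue product equals the flat per-character product
theorem prod_pow_count_eq {α : Type} [inst : BEq α] [LawfulBEq α] [DecidableEq α]
    (l : List α) (f : α → Int) :
    ((PySem.Set.ofList l).map (fun k => f k ^ l.count k)).prod = (l.map f).prod := by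
  have hnd := PySem.Set.nodup_ofList (xs := l)
  rw [← List.prod_toFinset _ hnd]
  have htf : (PySem.Set.ofList l).toFinset = l.toFinset := by
    ext x; simp [PySem.Set.mem_ofList]
  rw [htf, lawful_beq_subsingleton inst instBEqOfDecidableEq]
  have h := Finset.prod_multiset_map_count (l : Multiset α) f
  simpa using h.symm

-- ===== VERDICT (by name: the statement is the Claim_ definition above) =====
theorem calc_permutations_spec : Claim_equal_calc_permutations := by
  intro data _ _
  unfold Spec_calc_permutations calc_permutations calc_permutations_alt
  dsimp only
  rw [probDictB_eq, PySem.Dict.foldl_insert_getD_add_one_eq_counter, PySem.Dict.items_counter]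
  rw [foldl_mul_eq_prod, foldl_mul_eq_prod, List.map_map]
  have : ((fun p : Char × Int => probDict.getD p.1 0 ^ p.2.toNat) ∘
      fun k => (k, (data.toList.count k : Int))) =
      fun k => probDict.getD k 0 ^ data.toList.count k := by
    funext k; simp
  rw [this, prod_pow_count_eq]
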